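-- pv_equiv track=rewrite | github.com/Ingomancer/AoC2021 | sonar/sweep.py | increasing_depths
-- ===== SOURCE A (Python) =====
-- import math
--
-- def increasing_depths(input):
--     prev = math.inf
--     count = 0
--     sum_count = 0
--     last_four = []
--     for depth in input:
--         last_four.append(depth)
--         if len(last_four) == 4:
--             prev_three = last_four[0] + last_four[1] + last_four[2]
--             cur_three = last_four[1] + last_four[2] + last_four[3]
--             del last_four[0]
--             if cur_three > prev_three:
--                 sum_count += 1
--         if depth > prev:
--             count += 1
--         prev = depth
--     return (count, sum_count)
-- ===== SOURCE B (Python) =====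
-- def increasing_depths(input):
--     a = list(input)
--     count = sum(x < y for x, y in zip(a, a[1:]))
--     sum_count = sum(x < y for x, y in zip(a, a[3:]))
--     return (count, sum_count)
-- ===== Notes on version B (the rewrite author's own statement) =====
-- stated objective: simpler
-- what changed: Replaces the single stateful loop maintaining prev and a mutating 4-element window with two zip-based pairwise comparisons (a[i] vs a[i-1] and a[i] vs a[i-3], the 3-window sums sharing two terms so only the ends matter for integers).
import Mathlib
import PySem

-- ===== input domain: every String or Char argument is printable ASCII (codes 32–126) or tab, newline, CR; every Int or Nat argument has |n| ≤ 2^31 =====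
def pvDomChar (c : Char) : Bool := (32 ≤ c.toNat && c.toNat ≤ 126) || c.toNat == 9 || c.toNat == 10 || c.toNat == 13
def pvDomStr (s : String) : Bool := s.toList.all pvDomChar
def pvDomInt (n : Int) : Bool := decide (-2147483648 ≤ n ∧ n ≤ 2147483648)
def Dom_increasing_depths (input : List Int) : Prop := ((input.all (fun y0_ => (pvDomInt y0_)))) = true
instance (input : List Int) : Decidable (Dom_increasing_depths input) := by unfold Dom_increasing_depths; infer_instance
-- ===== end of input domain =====

-- B replaces A's stateful loop (prev + mutating 4-window) with two zip-based pairwise passes; objective: simpler.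

-- ===== PORT A =====
-- prev starts at math.inf; on an Int input 'depth > math.inf' is always False, so we model
-- prev as Option Int with none = math.inf (the comparison yields false for none).
def stepA (s : Option Int × Int × Int × List Int) (depth : Int) :
    Option Int × Int × Int × List Int :=
  let (prev, count, sum_count, last_four) := s
  let last_four := last_four ++ [depth]
  let (sum_count, last_four) :=
    if last_four.length == 4 then
      let prev_three := (PySem.List.pyGet? last_four 0).getD 0 + (PySem.List.pyGet? last_four 1).getD 0 + (PySem.List.pyGet? last_four 2).getD 0
      let cur_three := (PySem.List.pyGet? last_four 1).getD 0 + (PySem.List.pyGet? last_four 2).getD 0 + (PySem.List.pyGet? last_four 3).getD 0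
      let last_four := last_four.tail   -- del last_four[0]
      (if cur_three > prev_three then sum_count + 1 else sum_count, last_four)
    else (sum_count, last_four)
  let count := if (match prev with | none => false | some p => decide (depth > p)) then count + 1 else count
  (some depth, count, sum_count, last_four)

def increasing_depths (input : List Int) : Int × Int :=
  let s := input.foldl stepA (none, 0, 0, [])
  (s.2.1, s.2.2.1)

-- ===== PORT B =====
-- sum(x < y for x, y in zip(a, a[k:])) : booleans summed as 0/1
def pyBoolSum (l : List (Int × Int)) : Int :=
  (l.map (fun p => if p.1 < p.2 then (1 : Int) else 0)).sum

def increasing_depths_alt (input : List Int) : Int × Int :=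
  let a := input
  let count := pyBoolSum (a.zip (a.drop 1))
  let sum_count := pyBoolSum (a.zip (a.drop 3))
  (count, sum_count)

-- ===== PRECONDITION & SPEC =====
def Spec_increasing_depths (input : List Int) (out : Int × Int) : Prop := out = increasing_depths_alt input
instance (input : List Int) (out : Int × Int) : Decidable (Spec_increasing_depths input out) := by unfold Spec_increasing_depths; infer_instance

-- ===== CLAIM (what is proved, stated in full; the proofs are below) =====
def Claim_equal_increasing_depths : Prop := ∀ (input : List Int), Dom_increasing_depths input → Spec_increasing_depths input (increasing_depths input)

-- ===== LEMMAS AND PROOFS =====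

theorem pyBoolSum_cons (p : Int × Int) (l : List (Int × Int)) :
    pyBoolSum (p :: l) = (if p.1 < p.2 then (1 : Int) else 0) + pyBoolSum l := by
  simp [pyBoolSum]

-- steady-state invariant: once the window holds three elements [x,y,z] with prev = z
theorem foldA_steady (l : List Int) : ∀ (x y z c sc : Int),
    ((l.foldl stepA (some z, c, sc, [x, y, z])).2.1,
     (l.foldl stepA (some z, c, sc, [x, y, z])).2.2.1) =
    (c + pyBoolSum ((z :: l).zip l), sc + pyBoolSum ((x :: y :: z :: l).zip l)) := by
  induction l with
  | nil => intro x y z c sc; simp [pyBoolSum]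
  | cons d l' ih =>
    intro x y z c sc
    have hstep : stepA (some z, c, sc, [x, y, z]) d =
        (some d, (if z < d then c + 1 else c),
          (if x + y + z < y + z + d then sc + 1 else sc), [y, z, d]) := by
      simp [stepA, PySem.List.pyGet?, PySem.List.pyIdx?]
    rw [List.foldl_cons, hstep, ih y z d _ _]
    have h3 : (x + y + z < y + z + d) ↔ (x < d) := by omega
    simp only [List.zip_cons_cons, pyBoolSum_cons]
    rw [Prod.mk.injEq]
    refine ⟨?_, by rw [if_congr h3 rfl rfl]; split_ifs <;> ring⟩
    split_ifs <;> ring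

-- ===== VERDICT (by name: the statement is the Claim_ definition above) =====
theorem increasing_depths_spec : Claim_equal_increasing_depths := by
  intro input _
  unfold Spec_increasing_depths increasing_depths increasing_depths_alt
  match input with
  | [] => simp [pyBoolSum]
  | [a] => simp [stepA, pyBoolSum]
  | [a, b] => simp [stepA, pyBoolSum]
  | a :: b :: c :: rest =>
    have h0 : ([a, b, c].foldl stepA (none, 0, 0, [])) =
        (some c, (if a < b then (0:Int) + 1 else 0) + (if b < c then 1 else 0), 0, [a, b, c]) := by
      simp [stepA]
      split_ifs <;> simp
    have := foldA_steady rest a b c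
      ((if a < b then (0:Int) + 1 else 0) + (if b < c then 1 else 0)) 0
    simp only [show (a :: b :: c :: rest).foldl stepA (none, 0, 0, []) =
        rest.foldl stepA ((some c, (if a < b then (0:Int) + 1 else 0) + (if b < c then 1 else 0), 0, [a, b, c])) from by
      rw [show a :: b :: c :: rest = [a,b,c] ++ rest from rfl, List.foldl_append, h0]]
    rw [this]
    simp only [List.drop_succ_cons, List.drop_zero, List.zip_cons_cons, pyBoolSum_cons]
    rw [Prod.mk.injEq]
    constructor
    · split_ifs <;> ring
    · ring
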